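-- pv_equiv track=rewrite | github.com/JasperK04/adventOfCode | 2024/day8/resonance.py | findAntenna
-- ===== SOURCE A (Python) =====
-- def findAntenna(grid: list[list[str]]) -> dict[str, set[tuple[int, int]]]:
--     antennas = {}
--     for i, row in enumerate(grid):
--         for j, item in enumerate(row):
--             if item != '.':
--                 antennas[item] = antennas.get(item, set())
--                 antennas[item].add((i, j))
--     return antennas
-- ===== SOURCE B (Python) =====
-- def findAntenna(grid: list[list[str]]) -> dict[str, set[tuple[int, int]]]:
--     chars = []
--     for row in grid:
--         for item in row:
--             if item != '.' and item not in chars: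
--                 chars.append(item)
--     return {c: {(i, j)
--                 for i, row in enumerate(grid)
--                 for j, item in enumerate(row)
--                 if item == c}
--             for c in chars}
-- ===== Notes on version B (the rewrite author's own statement) =====
-- stated objective: alternative
-- what changed: B abandons A's single-pass dict of sets with get-or-create insertion: it first discovers the distinct antenna characters in one pass, then rescans the whole grid once per character to build that character's position set (O(k*n) per-key scans instead of A's O(n) incremental grouping).
import Mathlib
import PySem

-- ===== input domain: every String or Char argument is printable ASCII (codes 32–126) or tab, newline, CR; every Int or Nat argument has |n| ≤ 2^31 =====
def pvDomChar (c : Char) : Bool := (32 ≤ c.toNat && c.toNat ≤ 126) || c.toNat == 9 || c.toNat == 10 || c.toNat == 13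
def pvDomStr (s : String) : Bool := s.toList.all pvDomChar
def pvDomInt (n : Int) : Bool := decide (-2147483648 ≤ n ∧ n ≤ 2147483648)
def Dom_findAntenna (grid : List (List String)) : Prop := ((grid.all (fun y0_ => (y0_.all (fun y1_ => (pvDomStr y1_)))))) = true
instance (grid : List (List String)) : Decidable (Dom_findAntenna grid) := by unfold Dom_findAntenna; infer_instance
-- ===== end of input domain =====

-- B replaces A's single-pass dict-of-sets grouping by a two-stage algorithm: collect the distinct antenna characters, then rescan the grid once per character for its positions; same results, different algorithm (not claimed faster).
-- ===== PORT A =====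
def findAntenna (grid : List (List String)) : List (String × List (Int × Int)) :=
  ((PySem.List.enumerate grid).foldl (fun antennas irow =>
      (PySem.List.enumerate irow.2).foldl (fun antennas jitem =>
        if jitem.2 ≠ "." then
          let antennas := antennas.insert jitem.2 (antennas.getD jitem.2 PySem.Set.empty)
          antennas.insert jitem.2
            (PySem.Set.add (antennas.getD jitem.2 PySem.Set.empty) (irow.1, jitem.1))
        else antennas) antennas) PySem.Dict.empty).items

-- ===== PORT B =====
-- first pass: the distinct non-'.' characters, in first-occurrence order
def pvChars (grid : List (List String)) : List String :=
  grid.foldl (fun chars row =>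
    row.foldl (fun chars item =>
      if item ≠ "." ∧ ¬ chars.contains item then chars ++ [item] else chars) chars) []

-- per-character scan: the set comprehension over the whole grid
def pvPositions (grid : List (List String)) (c : String) : List (Int × Int) :=
  (PySem.List.enumerate grid).foldl (fun s irow =>
    (PySem.List.enumerate irow.2).foldl (fun s jitem =>
      if jitem.2 = c then PySem.Set.add s (irow.1, jitem.1) else s) s) PySem.Set.empty

def findAntenna_alt (grid : List (List String)) : List (String × List (Int × Int)) :=
  (pvChars grid).map (fun c => (c, pvPositions grid c))

-- ===== PRECONDITION & SPEC =====
def Spec_findAntenna (grid : List (List String)) (out : List (String × List (Int × Int))) : Prop := out = findAntenna_alt grid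
instance (grid : List (List String)) (out : List (String × List (Int × Int))) : Decidable (Spec_findAntenna grid out) := by unfold Spec_findAntenna; infer_instance

-- ===== CLAIM =====
def Claim_equal_findAntenna : Prop := ∀ (grid : List (List String)), Dom_findAntenna grid → Spec_findAntenna grid (findAntenna grid)

-- ===== LEMMAS AND PROOFS =====

-- flat list of (char, position) for every antenna cell: the common reference shape
def pvCells (grid : List (List String)) : List (String × (Int × Int)) :=
  (PySem.List.enumerate grid).flatMap (fun irow =>
    ((PySem.List.enumerate irow.2).filter (fun jitem => jitem.2 ≠ ".")).map
      (fun jitem => (jitem.2, (irow.1, jitem.1))))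

-- the collapsed step of A's inner loop: one insert per antenna cell
def pvStep (d : PySem.Dict String (List (Int × Int))) (c : String × (Int × Int)) :
    PySem.Dict String (List (Int × Int)) :=
  d.insert c.1 (PySem.Set.add (d.getD c.1 PySem.Set.empty) c.2)

-- the canonical grouped form both ports reduce to
def pvCanon (cells : List (String × (Int × Int))) : List (String × List (Int × Int)) :=
  (PySem.Set.ofList (cells.map (·.1))).map (fun k =>
    (k, PySem.Set.update PySem.Set.empty ((cells.filter (fun c => c.1 == k)).map (·.2))))

-- A's nested loops are the single fold of pvStep over the flat cell list
theorem findAntenna_eq_foldl (grid : List (List String)) :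
    findAntenna grid = ((pvCells grid).foldl pvStep PySem.Dict.empty).items := by
  unfold findAntenna pvCells
  rw [List.foldl_flatMap]
  congr 1
  apply PySem.List.foldl_congr_mem
  intro d irow _
  rw [List.foldl_map]
  rw [PySem.List.foldl_ite_eq_foldl_filter]
  apply PySem.List.foldl_congr_mem
  intro d jitem _
  simp only [pvStep, PySem.Dict.getD_insert_self, PySem.Dict.insert_insert_self]

theorem getD_foldl_pvStep (cells : List (String × (Int × Int)))
    (d : PySem.Dict String (List (Int × Int))) (k : String) :
    (cells.foldl pvStep d).getD k PySem.Set.empty =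
      PySem.Set.update (d.getD k PySem.Set.empty)
        ((cells.filter (fun c => c.1 == k)).map (·.2)) := by
  induction cells generalizing d with
  | nil => simp [PySem.Set.update]
  | cons c rest ih =>
    simp only [List.foldl_cons, List.filter_cons]
    by_cases h : c.1 = k
    · subst h
      simp only [beq_self_eq_true, if_pos, List.map_cons, ih, pvStep,
        PySem.Dict.getD_insert_self, PySem.Set.update, List.foldl_cons]
    · have hb : (c.1 == k) = false := by simp [h]
      simp only [hb, if_neg Bool.false_ne_true, ih, pvStep,
        PySem.Dict.getD_insert, if_neg (Ne.symm h)]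

theorem findAntenna_canon (grid : List (List String)) :
    findAntenna grid = pvCanon (pvCells grid) := by
  rw [findAntenna_eq_foldl]
  have hnd : ((pvCells grid).foldl pvStep PySem.Dict.empty).keys.Nodup :=
    PySem.Dict.nodup_keys_foldl_insert_key (pvCells grid) (·.1)
      (fun d c => PySem.Set.add (d.getD c.1 PySem.Set.empty) c.2) _
      PySem.Dict.nodup_keys_empty
  rw [PySem.Dict.items_eq_map_keys _ hnd PySem.Set.empty]
  have hkeys : ((pvCells grid).foldl pvStep PySem.Dict.empty).keys =
      PySem.Set.ofList ((pvCells grid).map (·.1)) :=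
    PySem.Dict.keys_foldl_insert_key (pvCells grid) (fun c => c.1)
      (fun d c => PySem.Set.add (d.getD c.1 PySem.Set.empty) c.2) PySem.Dict.empty
  rw [hkeys]
  unfold pvCanon
  apply List.map_congr_left
  intro k _
  rw [getD_foldl_pvStep]
  rfl

-- B side: enumerate-flatMap over a function of the row only collapses to a plain flatMap
theorem flatMap_enumerate_snd {β : Type} (grid : List (List String)) (s : Int)
    (g : List String → List β) :
    (PySem.List.enumerate grid s).flatMap (fun irow => g irow.2) = grid.flatMap g := by
  induction grid generalizing s with
  | nil => rfl
  | cons r rest ih => simp [PySem.List.enumerate_cons, ih]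

-- filter-then-project-snd over an enumerated row is a plain filter of the row
theorem filter_snd_enumerate (row : List String) (s : Int) (p : String → Bool) :
    ((PySem.List.enumerate row s).filter (fun j => p j.2)).map (·.2) = row.filter p := by
  induction row generalizing s with
  | nil => rfl
  | cons x xs ih =>
    simp only [PySem.List.enumerate_cons, List.filter_cons]
    by_cases h : p x = true
    · simp [h, ih]
    · simp [h, ih]

-- the key list B discovers is exactly the deduped first components of the cell list
theorem pvChars_eq (grid : List (List String)) :
    pvChars grid = PySem.Set.ofList ((pvCells grid).map (·.1)) := by
  have hmap : (pvCells grid).map (·.1) = grid.flatMap (fun row => row.filter (· ≠ ".")) := by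
    unfold pvCells
    rw [List.map_flatMap]
    have : ∀ irow : Int × List String,
        (((PySem.List.enumerate irow.2).filter (fun j => j.2 ≠ ".")).map
          (fun jitem => ((jitem.2, (irow.1, jitem.1)) : String × (Int × Int)))).map (·.1)
        = irow.2.filter (· ≠ ".") := by
      intro irow
      rw [List.map_map]
      exact filter_snd_enumerate irow.2 0 (· ≠ ".")
    calc (PySem.List.enumerate grid 0).flatMap
          (fun irow => (((PySem.List.enumerate irow.2).filter (fun j => j.2 ≠ ".")).map
            (fun jitem => ((jitem.2, (irow.1, jitem.1)) : String × (Int × Int)))).map (·.1))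
        = (PySem.List.enumerate grid 0).flatMap (fun irow => irow.2.filter (· ≠ ".")) := by
          apply List.flatMap_congr; intro irow _; exact this irow
      _ = grid.flatMap (fun row => row.filter (· ≠ ".")) :=
          flatMap_enumerate_snd grid 0 _
  rw [hmap]
  show pvChars grid = (grid.flatMap (fun row => row.filter (· ≠ "."))).foldl PySem.Set.add []
  unfold pvChars
  rw [List.foldl_flatMap]
  apply PySem.List.foldl_congr_mem
  intro s row _
  have hstep : row.foldl (fun chars item =>
      if item ≠ "." ∧ ¬ chars.contains item then chars ++ [item] else chars) s
      = row.foldl (fun chars item => if item ≠ "." then PySem.Set.add chars item else chars) s := by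
    apply PySem.List.foldl_congr_mem
    intro acc item _
    by_cases h1 : item = "."
    · simp [h1]
    · by_cases h2 : acc.contains item
      · simp [h1, PySem.Set.add, PySem.Set.contains]
      · simp [h1, PySem.Set.add, PySem.Set.contains]
  rw [hstep, PySem.List.foldl_ite_eq_foldl_filter]

-- every discovered character is a real antenna character (never '.')
theorem mem_cells_fst_ne (grid : List (List String)) (c : String)
    (h : c ∈ (pvCells grid).map (·.1)) : c ≠ "." := by
  obtain ⟨x, hx, rfl⟩ := List.mem_map.mp h
  unfold pvCells at hx
  obtain ⟨irow, -, hx⟩ := List.mem_flatMap.mp hx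
  obtain ⟨j, hj, rfl⟩ := List.mem_map.mp hx
  simpa using (List.mem_filter.mp hj).2

-- the per-character scan computes exactly the canonical group of that character
theorem pvPositions_eq (grid : List (List String)) (c : String) (hc : c ≠ ".") :
    pvPositions grid c =
      PySem.Set.update PySem.Set.empty (((pvCells grid).filter (fun x => x.1 == c)).map (·.2)) := by
  have hlist : ((pvCells grid).filter (fun x => x.1 == c)).map (·.2) =
      (PySem.List.enumerate grid 0).flatMap (fun irow =>
        ((PySem.List.enumerate irow.2).filter (fun j => decide (j.2 = c))).map
          (fun j => ((irow.1, j.1) : Int × Int))) := by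
    unfold pvCells
    rw [List.filter_flatMap, List.map_flatMap]
    apply List.flatMap_congr
    intro irow _
    rw [List.filter_map, List.filter_filter, List.map_map]
    congr 1
    apply List.filter_congr
    intro j _
    by_cases h : j.2 = c
    · subst h; simp [hc]
    · simp [h]
  rw [hlist]
  show pvPositions grid c = ((PySem.List.enumerate grid 0).flatMap _).foldl PySem.Set.add []
  unfold pvPositions
  rw [List.foldl_flatMap]
  apply PySem.List.foldl_congr_mem
  intro s irow _
  rw [List.foldl_map, PySem.List.foldl_ite_eq_foldl_filter]

-- B also reduces to the canonical grouped form
theorem findAntenna_alt_canon (grid : List (List String)) :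
    findAntenna_alt grid = pvCanon (pvCells grid) := by
  unfold findAntenna_alt pvCanon
  rw [pvChars_eq]
  apply List.map_congr_left
  intro k hk
  have hne : k ≠ "." :=
    mem_cells_fst_ne grid k ((PySem.Set.mem_ofList _ _).mp hk)
  rw [pvPositions_eq grid k hne]

-- ===== VERDICT =====
theorem findAntenna_spec : Claim_equal_findAntenna := by
  unfold Claim_equal_findAntenna Spec_findAntenna
  intro grid _
  rw [findAntenna_canon, findAntenna_alt_canon]
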